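-- pv_equiv track=rewrite | github.com/Blue-Cheesecake/_-Depreciated-_My-Playground | Basic/Test_MinionLanguage.py | solution
-- ===== SOURCE A (Python) =====
-- def solution(x):
--     reverse = {'a': 'z', 'b': 'y', 'c': 'x', 'd': 'w', 'e': 'v', 'f': 'u', 'g': 't', 'h': 's',
--                'i': 'r', 'j': 'q', 'k': 'p', 'l': 'o', 'm': 'n', 'n': 'm', 'o': 'l', 'p': 'k', 'q': 'j', 'r': 'i', 's': 'h',
--                't': 'g', 'u': 'f', 'v': 'e', 'w': 'd', 'x': 'c', 'y': 'b', 'z': 'a'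
--                }
--     state = ''
--     for i in range(len(x)):
--         for j in reverse.items():
--             if x[i] == j[0]:
--                 state += j[1]
--                 break
--         if x[i] not in reverse.keys():
--             state += x[i]
--     return state
-- ===== SOURCE B (Python) =====
-- def solution(x):
--     return ''.join(chr(219 - ord(c)) if 'a' <= c <= 'z' else c for c in x)
-- ===== Notes on version B (the rewrite author's own statement) =====
-- stated objective: simpler
-- what changed: Replaced the 26-entry reverse dict and the per-character inner scan over its items with the closed-form arithmetic chr(219 - ord(c)) for lowercase letters inside a single join/comprehension.
import Mathlib
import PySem

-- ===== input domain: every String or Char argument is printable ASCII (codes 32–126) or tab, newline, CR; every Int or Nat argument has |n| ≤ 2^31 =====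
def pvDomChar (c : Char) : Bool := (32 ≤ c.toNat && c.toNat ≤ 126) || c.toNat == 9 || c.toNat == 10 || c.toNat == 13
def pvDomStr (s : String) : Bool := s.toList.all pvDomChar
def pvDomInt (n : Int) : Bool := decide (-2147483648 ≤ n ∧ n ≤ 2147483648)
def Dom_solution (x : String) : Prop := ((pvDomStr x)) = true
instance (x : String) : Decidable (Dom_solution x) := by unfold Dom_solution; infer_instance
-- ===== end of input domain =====

-- B drops A's 26-entry reverse dict and inner scan, mapping each lowercase letter by the closed form 219 - code; simpler, same values.


-- ===== PORT A =====
-- the dict literal 'reverse', in insertion order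
def pvReverseTable : List (Char × Char) :=
  [('a','z'), ('b','y'), ('c','x'), ('d','w'), ('e','v'), ('f','u'), ('g','t'), ('h','s'),
   ('i','r'), ('j','q'), ('k','p'), ('l','o'), ('m','n'), ('n','m'), ('o','l'), ('p','k'),
   ('q','j'), ('r','i'), ('s','h'), ('t','g'), ('u','f'), ('v','e'), ('w','d'), ('x','c'),
   ('y','b'), ('z','a')]

-- the inner 'for j in reverse.items(): if x[i] == j[0]: state += j[1]; break'
-- followed by 'if x[i] not in reverse.keys(): state += x[i]'
def pvStepA (c : Char) : List Char :=
  (match pvReverseTable.find? (fun j => j.1 == c) with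
   | some j => [j.2]
   | none => []) ++
  (if pvReverseTable.any (fun j => j.1 == c) then [] else [c])

def solution (x : String) : String :=
  String.mk (x.toList.foldl (fun state c => state ++ pvStepA c) [])

-- ===== PORT B =====
def pvStepB (c : Char) : Char :=
  if 'a' ≤ c ∧ c ≤ 'z' then Char.ofNat (219 - c.toNat) else c

def solution_alt (x : String) : String :=
  String.mk (x.toList.map pvStepB)

-- ===== PRECONDITION & SPEC =====
def Spec_solution (x : String) (out : String) : Prop := out = solution_alt x
instance (x : String) (out : String) : Decidable (Spec_solution x out) := by unfold Spec_solution; infer_instance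

-- ===== CLAIM (what is proved, stated in full; the proofs are below) =====
def Claim_equal_solution : Prop := ∀ (x : String), Dom_solution x → Spec_solution x (solution x)

-- ===== LEMMAS AND PROOFS =====

-- per-character agreement, checked exhaustively on the ASCII range Dom admits
theorem pvStep_agree_ascii : ∀ n : Nat, n < 127 →
    pvStepA (Char.ofNat n) = [pvStepB (Char.ofNat n)] := by decide

theorem pvStep_agree (c : Char) (h : pvDomChar c = true) : pvStepA c = [pvStepB c] := by
  have hlt : c.toNat < 127 := by
    simp [pvDomChar] at h
    omega
  have := pvStep_agree_ascii c.toNat hlt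
  rwa [Char.ofNat_toNat] at this

theorem pvFold_agree (l : List Char) (acc : List Char) (h : l.all pvDomChar = true) :
    l.foldl (fun state c => state ++ pvStepA c) acc = acc ++ l.map pvStepB := by
  induction l generalizing acc with
  | nil => simp
  | cons c t ih =>
    simp only [List.all_cons, Bool.and_eq_true] at h
    simp only [List.foldl_cons, List.map_cons]
    rw [ih _ h.2, pvStep_agree c h.1]
    simp

-- ===== VERDICT (by name: the statement is the Claim_ definition above) =====
theorem solution_spec : Claim_equal_solution := by
  intro x hd
  unfold Spec_solution solution solution_alt
  rw [pvFold_agree x.toList [] hd]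
  simp
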